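-- pv_equiv track=rewrite | github.com/ChzFlvrHrse/MODU | backend/functions/section_spec_detection.py | division_parser
-- ===== SOURCE A (Python) =====
-- def division_parser(section_pages: dict) -> dict:
--     sections = section_pages.keys()
--     divisions: set[str] = set([sec[0:2] for sec in sections])
--     div_sec_pages = {div: {} for div in divisions}
--
--     for sec in sections:
--         div_key = sec[0:2]
--         div_sec_pages[div_key][f"{sec}"] = section_pages[sec]
--
--     return {"section_pages": div_sec_pages}
-- ===== SOURCE B (Python) =====
-- def division_parser(section_pages: dict) -> dict:
--     result = {}
--     remaining = list(section_pages.items())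
--     while remaining:
--         prefix = remaining[0][0][0:2]
--         result[prefix] = {sec: pages for sec, pages in remaining if sec[0:2] == prefix}
--         remaining = [(sec, pages) for sec, pages in remaining if sec[0:2] != prefix]
--     return {"section_pages": result}
-- ===== Notes on version B (the rewrite author's own statement) =====
-- stated objective: alternative
-- what changed: A's hash-bucket scatter (build the set of two-char prefixes, pre-initialise an empty bucket per prefix, then one populating pass writing each key into its bucket) is replaced by repeated partition extraction: peel off the first remaining key's prefix, build that whole bucket by filtering, drop those entries from the worklist, and repeat until it is empty - no prefix set and no dict-of-dicts mutation.
import Mathlib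
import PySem

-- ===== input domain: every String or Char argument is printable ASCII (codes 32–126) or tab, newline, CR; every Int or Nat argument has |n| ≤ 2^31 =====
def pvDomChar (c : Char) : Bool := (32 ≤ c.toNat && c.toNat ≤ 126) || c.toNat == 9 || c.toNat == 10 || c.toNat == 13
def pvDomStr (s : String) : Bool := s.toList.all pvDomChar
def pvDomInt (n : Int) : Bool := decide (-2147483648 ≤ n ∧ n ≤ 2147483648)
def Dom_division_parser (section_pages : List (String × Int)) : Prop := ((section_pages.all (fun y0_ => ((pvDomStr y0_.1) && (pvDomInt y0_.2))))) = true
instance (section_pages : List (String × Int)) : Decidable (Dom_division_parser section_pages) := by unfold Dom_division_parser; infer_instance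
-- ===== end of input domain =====

-- B replaces A's bucket scatter (prefix set, bucket pre-initialisation, populating pass) by
-- repeated partition extraction: peel off one prefix's whole bucket by filtering, repeat on the rest.


-- ===== PORT A =====
-- sections = keys; divisions = set of two-char prefixes; pre-init a bucket per prefix;
-- populate: div_sec_pages[div_key][sec] = section_pages[sec].  'd[k][sec] = v' with k known
-- present is exactly Dict.modify at k; 'section_pages[sec]' is first-match lookup on the dict.
def division_parser (section_pages : List (String × Int)) : List (String × List (String × List (String × Int))) :=
  let sections := section_pages.map Prod.fst
  let divisions : PySem.Set String :=
    PySem.Set.ofList (sections.map (fun sec => PySem.Str.slice sec (some 0) (some 2)))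
  let divSecPages : PySem.Dict String (PySem.Dict String Int) :=
    divisions.foldl (fun d div => d.insert div PySem.Dict.empty) PySem.Dict.empty
  let final := sections.foldl (fun d sec =>
    d.modify (PySem.Str.slice sec (some 0) (some 2)) PySem.Dict.empty
      (fun inner => inner.insert sec ((PySem.Dict.mk section_pages).getD sec 0))) divSecPages
  [("section_pages", final.items.map (fun q => (q.1, q.2.items)))]

-- ===== PORT B =====
-- the two-char division prefix 'sec[0:2]'
def pfxB (s : String) : String := PySem.Str.slice s (some 0) (some 2)

-- the while loop: result accumulator + shrinking worklist; the bucket dict comprehension is a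
-- fold of inserts over the filtered worklist.
def divisionBuild (result : PySem.Dict String (PySem.Dict String Int)) :
    List (String × Int) → PySem.Dict String (PySem.Dict String Int)
  | [] => result
  | p :: rest =>
      divisionBuild
        (result.insert (pfxB p.1)
          (((p :: rest).filter (fun q => pfxB q.1 == pfxB p.1)).foldl
            (fun d q => d.insert q.1 q.2) PySem.Dict.empty))
        ((p :: rest).filter (fun q => !(pfxB q.1 == pfxB p.1)))
  termination_by remaining => remaining.length
  decreasing_by
    simp only [List.filter_cons, beq_self_eq_true, Bool.not_true, Bool.false_eq_true,
      if_false]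
    exact Nat.lt_succ_of_le (List.length_filter_le _ _)

def division_parser_alt (section_pages : List (String × Int)) : List (String × List (String × List (String × Int))) :=
  [("section_pages", (divisionBuild PySem.Dict.empty section_pages).items.map (fun q => (q.1, q.2.items)))]

-- ===== PRECONDITION & SPEC =====
-- The parameter stands for a Python dict, whose keys are necessarily distinct; Pre_ states just
-- that, so no input the Python A can receive is excluded (on duplicate-key association lists,
-- which represent no dict, A's port keeps the first value and B's the last).
def Pre_division_parser (section_pages : List (String × Int)) : Prop :=
  (section_pages.map Prod.fst).Nodup
instance (section_pages : List (String × Int)) : Decidable (Pre_division_parser section_pages) := by unfold Pre_division_parser; infer_instance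

def pvWitness_division_parser : (List (String × Int)) := [("AB101", 3), ("AB205", 7), ("CD1", 2), ("", 0)]

def Spec_division_parser (section_pages : List (String × Int)) (out : List (String × List (String × List (String × Int)))) : Prop := out = division_parser_alt section_pages
instance (section_pages : List (String × Int)) (out : List (String × List (String × List (String × Int)))) : Decidable (Spec_division_parser section_pages out) := by unfold Spec_division_parser; infer_instance

-- ===== CLAIM (what is proved, stated in full; the proofs are below) =====
def Claim_equal_division_parser : Prop := ∀ (section_pages : List (String × Int)), Dom_division_parser section_pages → Pre_division_parser section_pages → Spec_division_parser section_pages (division_parser section_pages)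

-- ===== LEMMAS AND PROOFS =====

-- A's populating step, with the dict lookup already resolved to the pair's own value
def stepP (d : PySem.Dict String (PySem.Dict String Int)) (p : String × Int) :
    PySem.Dict String (PySem.Dict String Int) :=
  d.modify (pfxB p.1) PySem.Dict.empty (fun inner => inner.insert p.1 p.2)

-- the entries of l whose key has division prefix c, in order
def innerP (c : String) (l : List (String × Int)) : List (String × Int) :=
  l.filter (fun p => pfxB p.1 == c)

-- the distinct division prefixes of l, in first-occurrence order
def prefS (l : List (String × Int)) : PySem.Set String :=
  PySem.Set.ofList (l.map (fun p => pfxB p.1))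

lemma innerP_append_singleton (c : String) (l : List (String × Int)) (p : String × Int) :
    innerP c (l ++ [p]) = innerP c l ++ if pfxB p.1 == c then [p] else [] := by
  simp only [innerP, List.filter_append, List.filter_cons, List.filter_nil]

lemma prefS_append_singleton (l : List (String × Int)) (p : String × Int) :
    prefS (l ++ [p]) = PySem.Set.add (prefS l) (pfxB p.1) := by
  simp [prefS, PySem.Set.ofList, List.foldl_append]

lemma foldl_stepP_items (l : List (String × Int)) (d : PySem.Dict String (PySem.Dict String Int))
    (hnd : d.keys.Nodup)
    (hkeys : (l.map Prod.fst).Nodup)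
    (hfresh : ∀ p ∈ l, ∀ q ∈ d.items, q.2.contains p.1 = false) :
    (l.foldl stepP d).items =
      d.items.map (fun q => (q.1, PySem.Dict.mk (q.2.items ++ innerP q.1 l)))
      ++ ((prefS l).filter (fun c => !(d.contains c))).map
           (fun c => (c, PySem.Dict.mk (innerP c l))) := by
  induction l using List.reverseRecOn with
  | nil => simp [innerP, prefS, PySem.Set.ofList]
  | append_singleton l p IH =>
    -- facts about l from the hypotheses on l ++ [p]
    have hkeys' : (l.map Prod.fst).Nodup := by
      simpa using (List.nodup_append.mp (by simpa using hkeys)).1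
    have hpnotin : p.1 ∉ l.map Prod.fst := by
      have h2 := (List.nodup_append.mp (by simpa using hkeys)).2.2
      intro hmem; exact h2 _ hmem p.1 (by simp) rfl
    have hfresh' : ∀ p' ∈ l, ∀ q ∈ d.items, q.2.contains p'.1 = false := by
      intro p' hp' q hq; exact hfresh p' (by simp [hp']) q hq
    have hD := IH hkeys' hfresh'
    have hstep : (l ++ [p]).foldl stepP d
        = (l.foldl stepP d).insert (pfxB p.1)
            (((l.foldl stepP d).getD (pfxB p.1) PySem.Dict.empty).insert p.1 p.2) := by
      rw [List.foldl_append]; rfl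
    set D := l.foldl stepP d with hDdef
    have hDkeys : D.keys = d.keys ++ (prefS l).filter (fun c => !(d.contains c)) := by
      simp [PySem.Dict.keys, hD, List.map_map, Function.comp_def]
    have hDnodup : D.keys.Nodup := by
      rw [hDkeys]
      refine List.nodup_append.mpr ⟨hnd, (PySem.Set.nodup_ofList _).filter _, ?_⟩
      intro a ha b hb hab
      subst hab
      have h1 : d.contains a = false := by simpa using (List.mem_filter.mp hb).2
      have h2 : d.contains a = true := (PySem.Dict.contains_iff_mem_keys d a).mpr ha
      simp [h1] at h2
    have hpfx_notin_inner : ∀ c', p.1 ∉ (innerP c' l).map Prod.fst := by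
      intro c' hmem
      obtain ⟨q, hq, hq1⟩ := List.mem_map.mp hmem
      exact hpnotin (hq1 ▸ List.mem_map_of_mem (f := Prod.fst) (List.mem_of_mem_filter hq))
    rw [hstep]
    by_cases hc1 : pfxB p.1 ∈ d.keys
    · -- the bucket already exists in d
      obtain ⟨q0, hq0mem, hq0fst⟩ :=
        List.mem_map.mp (show pfxB p.1 ∈ d.items.map (fun x => x.1) from hc1)
      have hmemD : (pfxB p.1, PySem.Dict.mk (q0.2.items ++ innerP (pfxB p.1) l)) ∈ D.items := by
        rw [hD]
        exact List.mem_append_left _ (hq0fst ▸ List.mem_map_of_mem hq0mem)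
      have hgetD : D.getD (pfxB p.1) PySem.Dict.empty
          = PySem.Dict.mk (q0.2.items ++ innerP (pfxB p.1) l) :=
        PySem.Dict.getD_of_mem_items D hmemD hDnodup _
      have hcontD : D.contains (pfxB p.1) = true := by
        rw [PySem.Dict.contains_iff_mem_keys, hDkeys]
        exact List.mem_append_left _ hc1
      have hfreshmk : (PySem.Dict.mk (q0.2.items ++ innerP (pfxB p.1) l)).contains p.1 = false := by
        rw [Bool.eq_false_iff, Ne, PySem.Dict.contains_iff_mem_keys]
        intro hmem
        rw [PySem.Dict.keys_mk, List.map_append] at hmem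
        rcases List.mem_append.mp hmem with h | h
        · have : q0.2.contains p.1 = true := by
            rw [PySem.Dict.contains_iff_mem_keys]; simpa [PySem.Dict.keys] using h
          rw [hfresh p (by simp) q0 hq0mem] at this; exact Bool.false_ne_true this
        · exact hpfx_notin_inner _ h
      have hins : (D.getD (pfxB p.1) PySem.Dict.empty).insert p.1 p.2
          = PySem.Dict.mk (q0.2.items ++ innerP (pfxB p.1) l ++ [p]) := by
        rw [hgetD]
        exact PySem.Dict.ext (PySem.Dict.items_insert_of_not_contains _ p.2 hfreshmk)
      rw [hins, PySem.Dict.items_insert_of_contains _ _ hcontD, hD]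
      have hfilter : ((prefS (l ++ [p])).filter (fun c' => !(d.contains c')))
          = (prefS l).filter (fun c' => !(d.contains c')) := by
        rw [prefS_append_singleton, PySem.Set.add]
        have hdc : d.contains (pfxB p.1) = true := PySem.Dict.contains_iff_mem_keys d _ |>.mpr hc1
        split
        · rfl
        · rw [List.filter_append]; simp [hdc]
      rw [hfilter, List.map_append, List.map_map, List.map_map]
      congr 1
      · refine List.map_congr_left ?_
        intro q hq
        by_cases hqc : q.1 = pfxB p.1
        · have hq0 : q = q0 := List.inj_on_of_nodup_map
            (by simpa [PySem.Dict.keys] using hnd) hq hq0mem (by rw [hqc, hq0fst])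
          subst hq0
          simp [hqc, innerP_append_singleton, List.append_assoc]
        · simp [hqc, innerP_append_singleton, Ne.symm hqc]
      · refine List.map_congr_left ?_
        intro c' hc'
        have hc'd : d.contains c' = false := by
          have := (List.mem_filter.mp hc').2; simpa using this
        have hne : c' ≠ pfxB p.1 := by
          intro h; subst h
          rw [(PySem.Dict.contains_iff_mem_keys d _).mpr hc1] at hc'd; simp at hc'd
        simp [hne, innerP_append_singleton, Ne.symm hne]
    · by_cases hc2 : pfxB p.1 ∈ prefS l
      · -- bucket created earlier in l
        have hdc : d.contains (pfxB p.1) = false := by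
          rw [Bool.eq_false_iff, Ne, PySem.Dict.contains_iff_mem_keys]; exact hc1
        have hcfil : pfxB p.1 ∈ (prefS l).filter (fun c' => !(d.contains c')) :=
          List.mem_filter.mpr ⟨hc2, by simp [hdc]⟩
        have hmemD : (pfxB p.1, PySem.Dict.mk (innerP (pfxB p.1) l)) ∈ D.items := by
          rw [hD]
          exact List.mem_append_right _ (List.mem_map_of_mem hcfil)
        have hgetD : D.getD (pfxB p.1) PySem.Dict.empty = PySem.Dict.mk (innerP (pfxB p.1) l) :=
          PySem.Dict.getD_of_mem_items D hmemD hDnodup _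
        have hcontD : D.contains (pfxB p.1) = true := by
          rw [PySem.Dict.contains_iff_mem_keys, hDkeys]
          exact List.mem_append_right _ hcfil
        have hfreshmk : (PySem.Dict.mk (innerP (pfxB p.1) l)).contains p.1 = false := by
          rw [Bool.eq_false_iff, Ne, PySem.Dict.contains_iff_mem_keys]
          intro hmem
          exact hpfx_notin_inner _ (by simpa [PySem.Dict.keys] using hmem)
        have hins : (D.getD (pfxB p.1) PySem.Dict.empty).insert p.1 p.2
            = PySem.Dict.mk (innerP (pfxB p.1) l ++ [p]) := by
          rw [hgetD]
          exact PySem.Dict.ext (PySem.Dict.items_insert_of_not_contains _ p.2 hfreshmk)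
        rw [hins, PySem.Dict.items_insert_of_contains _ _ hcontD, hD]
        have hfilter : ((prefS (l ++ [p])).filter (fun c' => !(d.contains c')))
            = (prefS l).filter (fun c' => !(d.contains c')) := by
          rw [prefS_append_singleton, PySem.Set.add]
          rw [if_pos ((PySem.Set.contains_iff _ _).mpr hc2)]
        rw [hfilter, List.map_append, List.map_map, List.map_map]
        congr 1
        · refine List.map_congr_left ?_
          intro q hq
          have hne : q.1 ≠ pfxB p.1 := by
            intro h; exact hc1 (h ▸ List.mem_map_of_mem (f := Prod.fst) hq)
          simp [hne, innerP_append_singleton, Ne.symm hne]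
        · refine List.map_congr_left ?_
          intro c' hc'
          by_cases hne : c' = pfxB p.1
          · subst hne
            simp [innerP_append_singleton]
          · simp [hne, innerP_append_singleton, Ne.symm hne]
      · -- brand-new bucket
        have hdc : d.contains (pfxB p.1) = false := by
          rw [Bool.eq_false_iff, Ne, PySem.Dict.contains_iff_mem_keys]; exact hc1
        have hcontD : D.contains (pfxB p.1) = false := by
          rw [Bool.eq_false_iff, Ne, PySem.Dict.contains_iff_mem_keys, hDkeys]
          intro hmem
          rcases List.mem_append.mp hmem with h | h
          · exact hc1 h
          · exact hc2 (List.mem_of_mem_filter h)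
        have hgetD : D.getD (pfxB p.1) PySem.Dict.empty = PySem.Dict.empty :=
          PySem.Dict.getD_of_not_contains D _ hcontD
        have hins : (D.getD (pfxB p.1) PySem.Dict.empty).insert p.1 p.2
            = PySem.Dict.mk [p] := by
          rw [hgetD]
          exact PySem.Dict.ext
            (PySem.Dict.items_insert_of_not_contains _ p.2 (PySem.Dict.contains_empty p.1))
        have hinnernil : innerP (pfxB p.1) l = [] := by
          rw [innerP, List.filter_eq_nil_iff]
          intro q hq hpf
          exact hc2 ((PySem.Set.mem_ofList _ _).mpr
            (List.mem_map.mpr ⟨q, hq, by simpa using hpf.symm⟩))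
        rw [hins, PySem.Dict.items_insert_of_not_contains _ _ hcontD, hD]
        have hfilter : ((prefS (l ++ [p])).filter (fun c' => !(d.contains c')))
            = (prefS l).filter (fun c' => !(d.contains c')) ++ [pfxB p.1] := by
          rw [prefS_append_singleton, PySem.Set.add]
          rw [if_neg (fun h => hc2 ((PySem.Set.contains_iff _ _).mp h))]
          rw [List.filter_append]; simp [hdc]
        rw [hfilter, List.map_append]
        rw [List.append_assoc]
        congr 1
        · refine List.map_congr_left ?_
          intro q hq
          have hne : q.1 ≠ pfxB p.1 := by
            intro h; exact hc1 (h ▸ List.mem_map_of_mem (f := Prod.fst) hq)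
          simp [innerP_append_singleton, Ne.symm hne]
        · congr 1
          · refine List.map_congr_left ?_
            intro c' hc'
            have hne : c' ≠ pfxB p.1 := by
              intro h; exact hc2 (h ▸ List.mem_of_mem_filter hc')
            simp [innerP_append_singleton, Ne.symm hne]
          · simp [innerP_append_singleton, hinnernil]

lemma A_items (l : List (String × Int)) (hkeys : (l.map Prod.fst).Nodup) :
    (l.foldl stepP
      ((prefS l).foldl (fun d div => d.insert div PySem.Dict.empty) PySem.Dict.empty)).items =
      (prefS l).map (fun c => (c, PySem.Dict.mk (innerP c l))) := by
  have hinit : ((prefS l).foldl (fun d div => d.insert div PySem.Dict.empty)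
      (PySem.Dict.empty : PySem.Dict String (PySem.Dict String Int))).items
      = (prefS l).map (fun c => (c, PySem.Dict.empty)) := by
    have := PySem.Dict.items_foldl_insert_fresh (prefS l) (fun c => c)
      (fun _ => (PySem.Dict.empty : PySem.Dict String Int)) PySem.Dict.empty
      (by intro a _; exact PySem.Dict.contains_empty a)
      (by rw [show (fun (c : String) => c) = id from rfl, List.map_id]
          exact PySem.Set.nodup_ofList _)
    simpa [PySem.Dict.empty] using this
  set dI := (prefS l).foldl (fun d div => d.insert div PySem.Dict.empty)
      (PySem.Dict.empty : PySem.Dict String (PySem.Dict String Int)) with hdI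
  have hkeysI : dI.keys = prefS l := by
    simp [PySem.Dict.keys, hinit, List.map_map, Function.comp_def]
  rw [foldl_stepP_items l dI
    (by rw [hkeysI]; exact PySem.Set.nodup_ofList _) hkeys
    (by intro p _ q hq
        rw [hinit] at hq
        obtain ⟨c, _, hc⟩ := List.mem_map.mp hq
        rw [← hc]
        exact PySem.Dict.contains_empty p.1)]
  have hfilnil : (prefS l).filter (fun c => !(dI.contains c)) = [] := by
    rw [List.filter_eq_nil_iff]
    intro c hc hcon
    rw [(PySem.Dict.contains_iff_mem_keys dI c).mpr (hkeysI ▸ hc)] at hcon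
    simp at hcon
  rw [hfilnil, hinit, List.map_map]
  simp [PySem.Dict.empty]

-- dedup commutes with filter
lemma discard_eq (s : List String) (x : String) :
    PySem.Set.discard s x = s.filter (fun y => !(y == x)) := rfl

lemma ofList_filter (p : String → Bool) (zs : List String) :
    PySem.Set.ofList (zs.filter p) = (PySem.Set.ofList zs).filter p := by
  induction zs with
  | nil => rfl
  | cons z t IH =>
    by_cases hz : p z = true
    · rw [List.filter_cons_of_pos hz, PySem.Set.ofList_cons, PySem.Set.ofList_cons,
        List.filter_cons_of_pos hz, IH, discard_eq, discard_eq,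
        List.filter_filter, List.filter_filter]
      exact congrArg _ (List.filter_congr (fun a _ => Bool.and_comm _ _))
    · have hz' : p z = false := by simpa using hz
      rw [List.filter_cons_of_neg hz, PySem.Set.ofList_cons,
        List.filter_cons_of_neg hz, IH, discard_eq, List.filter_filter]
      refine (List.filter_congr ?_).symm
      intro a _
      by_cases ha : a = z
      · subst ha; simp [hz']
      · simp [ha]

set_option maxHeartbeats 1000000 in
lemma divisionBuild_items (remaining : List (String × Int))
    (result : PySem.Dict String (PySem.Dict String Int))
    (hnodR : result.keys.Nodup)
    (hdisj : ∀ c ∈ remaining.map (fun p => pfxB p.1), result.contains c = false)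
    (hkeys : (remaining.map Prod.fst).Nodup) :
    (divisionBuild result remaining).items
      = result.items ++ (prefS remaining).map (fun c => (c, PySem.Dict.mk (innerP c remaining))) := by
  match remaining with
  | [] => simp [divisionBuild, prefS, PySem.Set.ofList]
  | p :: rest =>
    have hrem' : (p :: rest).filter (fun q => !(pfxB q.1 == pfxB p.1))
        = rest.filter (fun q => !(pfxB q.1 == pfxB p.1)) :=
      List.filter_cons_of_neg (by simp)
    -- the bucket comprehension is exactly Dict.mk (innerP (pfxB p.1) (p :: rest))
    have hbkeys : ((innerP (pfxB p.1) (p :: rest)).map Prod.fst).Nodup :=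
      hkeys.sublist (List.filter_sublist.map _)
    have hbucket : ((p :: rest).filter (fun q => pfxB q.1 == pfxB p.1)).foldl
          (fun d q => d.insert q.1 q.2) PySem.Dict.empty
        = PySem.Dict.mk (innerP (pfxB p.1) (p :: rest)) := by
      refine PySem.Dict.ext ?_
      have := PySem.Dict.items_foldl_insert_fresh (innerP (pfxB p.1) (p :: rest))
        Prod.fst Prod.snd PySem.Dict.empty
        (by intro a _; exact PySem.Dict.contains_empty a.1) hbkeys
      simpa [innerP, PySem.Dict.empty] using this
    -- prefixes occurring in the shrunk worklist differ from pfxB p.1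
    have hne_of_mem : ∀ c' ∈ (rest.filter (fun q => !(pfxB q.1 == pfxB p.1))).map
        (fun q => pfxB q.1), c' ≠ pfxB p.1 := by
      intro c' hc' h
      obtain ⟨q, hq, hq1⟩ := List.mem_map.mp hc'
      have := (List.mem_filter.mp hq).2
      rw [hq1, h] at this; simp at this
    have hcont : result.contains (pfxB p.1) = false := hdisj _ (by simp)
    have IH := divisionBuild_items (rest.filter (fun q => !(pfxB q.1 == pfxB p.1)))
      (result.insert (pfxB p.1) (PySem.Dict.mk (innerP (pfxB p.1) (p :: rest))))
      (PySem.Dict.nodup_keys_insert _ _ _ hnodR)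
      (by intro c' hc'
          rw [PySem.Dict.contains_insert]
          have h1 : (c' == pfxB p.1) = false := by
            simpa using hne_of_mem c' hc'
          have h2 : result.contains c' = false := by
            obtain ⟨q, hq, hq1⟩ := List.mem_map.mp hc'
            exact hdisj c' (by
              exact List.mem_map.mpr ⟨q, List.mem_cons_of_mem _ (List.mem_of_mem_filter hq), hq1⟩)
          rw [h1, h2]; rfl)
      (by refine hkeys.sublist ?_
          exact List.Sublist.trans (List.filter_sublist.map _)
            ((List.sublist_cons_self _ _).map _))
    rw [divisionBuild]
    rw [hbucket, hrem', IH,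
      PySem.Dict.items_insert_of_not_contains _ _ hcont, List.append_assoc]
    congr 1
    -- prefS (p :: rest) = pfxB p.1 :: prefS rem'
    have hmapfil : (rest.filter (fun q => !(pfxB q.1 == pfxB p.1))).map (fun q => pfxB q.1)
        = (rest.map (fun q => pfxB q.1)).filter (fun z => !(z == pfxB p.1)) := by
      rw [List.filter_map]; rfl
    have hpref : prefS (p :: rest)
        = pfxB p.1 :: prefS (rest.filter (fun q => !(pfxB q.1 == pfxB p.1))) := by
      show PySem.Set.ofList (pfxB p.1 :: rest.map (fun q => pfxB q.1)) = _
      rw [PySem.Set.ofList_cons]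
      congr 1
      rw [prefS, hmapfil, ofList_filter]
      rfl
    rw [hpref, List.map_cons, List.singleton_append]
    congr 1
    -- inner buckets are unchanged by dropping the extracted prefix's entries
    refine (List.map_congr_left ?_).symm
    intro c' hc'
    have hne : c' ≠ pfxB p.1 := by
      rw [prefS] at hc'
      exact hne_of_mem c' ((PySem.Set.mem_ofList _ _).mp hc')
    have h1 : innerP c' (p :: rest) = innerP c' rest := by
      rw [innerP, List.filter_cons_of_neg (by simpa using Ne.symm hne)]
      rfl
    have h2 : innerP c' (rest.filter (fun q => !(pfxB q.1 == pfxB p.1))) = innerP c' rest := by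
      rw [innerP, List.filter_filter]
      refine List.filter_congr ?_
      intro q _
      by_cases hq : pfxB q.1 = c'
      · simp [hq, hne]
      · simp [hq]
    rw [h1, h2]
  termination_by remaining.length
  decreasing_by
    simp only [List.length_cons]
    exact Nat.lt_succ_of_le (List.length_filter_le _ _)

-- the two sides, assembled
lemma ports_eq (l : List (String × Int)) (hpre : (l.map Prod.fst).Nodup) :
    (let sections := l.map Prod.fst
     let divisions : PySem.Set String :=
       PySem.Set.ofList (sections.map (fun sec => PySem.Str.slice sec (some 0) (some 2)))
     let divSecPages : PySem.Dict String (PySem.Dict String Int) :=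
       divisions.foldl (fun d div => d.insert div PySem.Dict.empty) PySem.Dict.empty
     let final := sections.foldl (fun d sec =>
       d.modify (PySem.Str.slice sec (some 0) (some 2)) PySem.Dict.empty
         (fun inner => inner.insert sec ((PySem.Dict.mk l).getD sec 0))) divSecPages
     [("section_pages", final.items.map (fun q => (q.1, q.2.items)))])
    = [("section_pages",
        (divisionBuild PySem.Dict.empty l).items.map (fun q => (q.1, q.2.items)))] := by
  simp only []
  have hA : (l.map Prod.fst).foldl (fun d sec =>
       d.modify (PySem.Str.slice sec (some 0) (some 2)) PySem.Dict.empty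
         (fun inner => inner.insert sec ((PySem.Dict.mk l).getD sec 0)))
       ((PySem.Set.ofList ((l.map Prod.fst).map (fun sec => PySem.Str.slice sec (some 0) (some 2)))).foldl
         (fun d div => d.insert div PySem.Dict.empty) PySem.Dict.empty)
      = l.foldl stepP
       ((prefS l).foldl (fun d div => d.insert div PySem.Dict.empty) PySem.Dict.empty) := by
    rw [List.foldl_map]
    have hmap : (l.map Prod.fst).map (fun sec => PySem.Str.slice sec (some 0) (some 2))
        = l.map (fun p => pfxB p.1) := by simp [List.map_map, Function.comp_def, pfxB]
    rw [hmap]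
    refine PySem.List.foldl_congr_mem l _ _ _ ?_
    intro acc p hp
    have : (PySem.Dict.mk l).getD p.1 0 = p.2 := by
      refine PySem.Dict.getD_of_mem_items (PySem.Dict.mk l) ?_ ?_ 0
      · exact hp
      · simpa [PySem.Dict.keys_mk] using hpre
    rw [this]; rfl
  have hB : (divisionBuild PySem.Dict.empty l).items
      = (prefS l).map (fun c => (c, PySem.Dict.mk (innerP c l))) := by
    rw [divisionBuild_items l PySem.Dict.empty PySem.Dict.nodup_keys_empty
      (by intro c _; exact PySem.Dict.contains_empty c) hpre]
    simp [PySem.Dict.empty]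
  rw [hA, hB, A_items l hpre]

-- ===== VERDICT (by name: the statement is the Claim_ definition above) =====
theorem division_parser_spec : Claim_equal_division_parser := by
  intro l _ hpre
  show division_parser l = division_parser_alt l
  exact ports_eq l hpre
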